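-- pv_equiv track=rewrite | github.com/GarfieldJiang/CLRS | P7_SelectedTopics/NumberTheory/notions.py | check_power
-- ===== SOURCE A (Python) =====
-- def power(a: int, n: int):
--     """
--     Simple divide-and-conquer method to calculate a to the n'th.
--     :param a: base.
--     :param n: non-negative power.
--     :return:
--     """
--     if n < 0:
--         raise ValueError()
--     if n == 0:
--         if a == 0:
--             raise ValueError()
--         return 1
--     if n == 1:
--         return a
--     half = power(a, n // 2)
--     return half * half * power(a, n % 2)
--
-- def check_power(n: int):
--     """
--     ex 31.1-8
--     :param n: b-bit non-negative integer.
--     :return: (x, y) where n = power(x, y) with minimum y and 1 < x < n, or (None, None) if no such expression exists.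
--     """
--     if n <= 0:
--         raise ValueError()
--
--     bit_count = 0  # b
--     while (n >> bit_count) != 0:  # O(b)
--         bit_count += 1
--
--     for k in range(2, bit_count):  # O(b) * inside
--         # k and bit_count (b) should be considered as fixed length integers
--         lo = 1 << ((bit_count - 1) // k)  # O(b^2)
--         q, r = bit_count // k, bit_count % k  # O(b^2)
--         if r > 0:
--             q = q + 1
--         hi = (1 << q) - 1
--         while lo <= hi:  # O(b / k) * inside
--             mid = lo + ((hi - lo) >> 1)
--             num = power(mid, k)  # O(b^2 k log k)
--             if num == n:
--                 return mid, k
--             if num > n: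
--                 hi = mid - 1  # O(b)
--             else:
--                 lo = mid + 1  # O(b)
--
--     return None, None
-- ===== SOURCE B (Python) =====
-- def check_power(n):
--     # Base-major search: for each base x with x*x <= n, walk the exact powers
--     # x^2, x^3, ... up to n and record the hit with the smallest exponent.
--     if n <= 0:
--         raise ValueError()
--     best = (None, None)
--     x = 2
--     while x * x <= n:
--         p = x * x
--         k = 2
--         while p <= n:
--             if p == n and (best[1] is None or k < best[1]):
--                 best = (x, k)
--             p *= x
--             k += 1
--         x += 1
--     return best
-- ===== Notes on version B (the rewrite author's own statement) =====
-- stated objective: alternative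
-- what changed: A iterates over candidate exponents k and binary-searches the base for each; B iterates over bases x, multiplying up exact powers x^2, x^3, ... and keeping the candidate with the smallest exponent.
import Mathlib
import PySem

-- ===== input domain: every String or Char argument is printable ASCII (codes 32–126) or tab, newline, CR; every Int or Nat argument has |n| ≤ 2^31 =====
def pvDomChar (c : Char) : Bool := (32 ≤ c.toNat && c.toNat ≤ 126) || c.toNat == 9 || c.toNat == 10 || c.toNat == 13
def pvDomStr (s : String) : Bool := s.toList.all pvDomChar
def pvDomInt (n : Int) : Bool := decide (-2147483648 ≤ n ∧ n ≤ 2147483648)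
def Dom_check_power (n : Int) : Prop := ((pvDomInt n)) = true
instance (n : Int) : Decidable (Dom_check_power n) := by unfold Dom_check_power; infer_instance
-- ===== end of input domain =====

-- B replaces A's exponent-major loop with binary search per exponent by a base-major walk
-- over exact powers keeping the smallest exponent; equivalence of the return values is proved
-- for every n ≥ 1 (A and B both raise ValueError on n ≤ 0, excluded by Pre_).

-- ===== PORT A =====
-- termination measures of the loops, proved once so the definitions stay small
lemma power_dec1 (n : Int) (h2 : ¬ n = 1) (h1 : ¬ n = 0) (h0 : ¬ n < 0) :
    (PySem.Int.floordiv n 2).toNat < n.toNat := by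
  have h : PySem.Int.floordiv n 2 = n / 2 := PySem.Int.floordiv_eq_ediv_of_pos (by omega)
  rw [h]; omega

lemma power_dec2 (n : Int) (h2 : ¬ n = 1) (h1 : ¬ n = 0) (h0 : ¬ n < 0) :
    (PySem.Int.mod n 2).toNat < n.toNat := by
  have ha := PySem.Int.mod_nonneg n (b := 2) (by omega)
  have hb := PySem.Int.mod_lt n (b := 2) (by omega)
  omega

lemma bitLoop_dec (n b : Int) (hn : ¬ n ≤ 0)
    (hd : PySem.Int.floordiv n (2 ^ b.toNat) ≠ 0) :
    (n + 1 - (b + 1)).toNat < (n + 1 - b).toNat := by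
  have hpow : (0:Int) < 2 ^ b.toNat := by positivity
  have h2 : PySem.Int.floordiv n (2 ^ b.toNat) = n / 2 ^ b.toNat :=
    PySem.Int.floordiv_eq_ediv_of_pos hpow
  rw [h2] at hd
  have hle : 2 ^ b.toNat ≤ n := by
    by_contra hlt
    exact hd (Int.ediv_eq_zero_of_lt (by omega) (by omega))
  have hbn : (b.toNat : Int) < 2 ^ b.toNat := by exact_mod_cast Nat.lt_two_pow_self
  omega

lemma binsearch_dec1 (lo hi : Int) (h : lo ≤ hi) :
    (lo + PySem.Int.floordiv (hi - lo) 2 - 1 + 1 - lo).toNat < (hi + 1 - lo).toNat := by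
  have h2 : PySem.Int.floordiv (hi - lo) 2 = (hi - lo) / 2 :=
    PySem.Int.floordiv_eq_ediv_of_pos (by omega)
  rw [h2]; omega

lemma binsearch_dec2 (lo hi : Int) (h : lo ≤ hi) :
    (hi + 1 - (lo + PySem.Int.floordiv (hi - lo) 2 + 1)).toNat < (hi + 1 - lo).toNat := by
  have h2 : PySem.Int.floordiv (hi - lo) 2 = (hi - lo) / 2 :=
    PySem.Int.floordiv_eq_ediv_of_pos (by omega)
  rw [h2]; omega

lemma searchK_dec (b k : Int) (h : k < b) : (b - (k + 1)).toNat < (b - k).toNat := by omega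

lemma altInner_dec (n x p : Int) (h2 : p < p * x) (h1 : p ≤ n) :
    (n + 1 - p * x).toNat < (n + 1 - p).toNat := by omega

lemma altOuter_dec (n x : Int) (h : x * x ≤ n) :
    (n + 1 - (x + 1)).toNat < (n + 1 - x).toNat := by
  have hxn : x ≤ n := by
    rcases le_total x 0 with h1 | h1
    · nlinarith
    · nlinarith
  omega

-- power(a, n): Python raises ValueError when n < 0 or (n = 0 and a = 0); those branches
-- return 0 here — check_power only calls power with n ≥ 2 and a ≥ 1, where the port is exact.
def power (a : Int) (n : Int) : Int :=
  if n < 0 then 0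
  else if n = 0 then (if a = 0 then 0 else 1)
  else if n = 1 then a
  else
    let half := power a (PySem.Int.floordiv n 2)
    half * half * power a (PySem.Int.mod n 2)
termination_by n.toNat
decreasing_by
  · exact power_dec1 _ ‹_› ‹_› ‹_›
  · exact power_dec2 _ ‹_› ‹_› ‹_›

-- the bit_count loop; 'n >> bit_count' is ported as floor division by 2 ^ bit_count
-- (exact: bit_count ≥ 0 throughout).  The 'n ≤ 0' test is only a totality guard:
-- check_power reaches this loop only with n ≥ 1, and Python's loop would not terminate
-- for n < 0.
def bitLoop (n : Int) (b : Int) : Int :=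
  if n ≤ 0 then b
  else if PySem.Int.floordiv n (2 ^ b.toNat) ≠ 0 then bitLoop n (b + 1) else b
termination_by (n + 1 - b).toNat
decreasing_by exact bitLoop_dec _ _ ‹_› ‹_›

-- the inner 'while lo <= hi' binary search; '(hi - lo) >> 1' is floor division by 2 (exact)
def binsearch (n k lo hi : Int) : Option Int :=
  if lo ≤ hi then
    let mid := lo + PySem.Int.floordiv (hi - lo) 2
    let num := power mid k
    if num = n then some mid
    else if num > n then binsearch n k lo (mid - 1)
    else binsearch n k (mid + 1) hi
  else none
termination_by (hi + 1 - lo).toNat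
decreasing_by
  · exact binsearch_dec1 _ _ ‹_›
  · exact binsearch_dec2 _ _ ‹_›

-- 'for k in range(2, bit_count)' with early return, as a counter loop from k = 2;
-- '1 << e' is ported as 2 ^ e.toNat (exact: e ≥ 0 on every call reached from check_power)
def searchK (n b k : Int) : Option Int × Option Int :=
  if k < b then
    let lo := 2 ^ (PySem.Int.floordiv (b - 1) k).toNat
    let q := PySem.Int.floordiv b k
    let r := PySem.Int.mod b k
    let q2 := if r > 0 then q + 1 else q
    let hi := 2 ^ q2.toNat - 1
    match binsearch n k lo hi with
    | some x => (some x, some k)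
    | none => searchK n b (k + 1)
  else (none, none)
termination_by (b - k).toNat
decreasing_by exact searchK_dec _ _ ‹_›

def check_power (n : Int) : Option Int × Option Int :=
  if n ≤ 0 then (none, none)  -- Python raises ValueError here; excluded by Pre_check_power
  else searchK n (bitLoop n 0) 2

-- ===== PORT B =====
-- inner 'while p <= n' of Source B: walk p = x^k upward, record (x, k) when p = n and k improves;
-- the 'p < p * x' test is only a totality guard (always true on real calls: p ≥ 4, x ≥ 2)
def altInner (n x p k : Int) (best : Option Int × Option Int) : Option Int × Option Int :=
  if p ≤ n then
    let good : Bool := match best.2 with | none => true | some bk => k < bk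
    let best' := if p = n ∧ good = true then (some x, some k) else best
    if _h : p < p * x then altInner n x (p * x) (k + 1) best'
    else best'
  else best
termination_by (n + 1 - p).toNat
decreasing_by exact altInner_dec _ _ _ ‹_› ‹_›

-- outer 'while x * x <= n' of Source B
def altOuter (n x : Int) (best : Option Int × Option Int) : Option Int × Option Int :=
  if x * x ≤ n then
    altOuter n (x + 1) (altInner n x (x * x) 2 best)
  else best
termination_by (n + 1 - x).toNat
decreasing_by exact altOuter_dec _ _ ‹_›

def check_power_alt (n : Int) : Option Int × Option Int :=
  if n ≤ 0 then (none, none)  -- Python raises ValueError here; excluded by Pre_check_power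
  else altOuter n 2 (none, none)

-- ===== PRECONDITION & SPEC =====
-- Pre_ excludes exactly n ≤ 0, where the Python check_power raises ValueError.
def Pre_check_power (n : Int) : Prop := 1 ≤ n
instance (n : Int) : Decidable (Pre_check_power n) := by unfold Pre_check_power; infer_instance
def pvWitness_check_power : Int := (64)

def Spec_check_power (n : Int) (out : Option Int × Option Int) : Prop := out = check_power_alt n
instance (n : Int) (out : Option Int × Option Int) : Decidable (Spec_check_power n out) := by
  unfold Spec_check_power; infer_instance

-- ===== CLAIM (what is proved, stated in full; the proofs are below) =====
def Claim_equal_check_power : Prop :=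
  ∀ (n : Int), Dom_check_power n → Pre_check_power n → Spec_check_power n (check_power n)

-- ===== LEMMAS AND PROOFS =====

-- (x, k) is a valid decomposition of n: n = x ^ k with 1 < x (and hence x < n), 2 ≤ k
def Sol (n x k : Int) : Prop := 2 ≤ x ∧ 2 ≤ k ∧ x ^ k.toNat = n

-- what both programs return: (None, None) if no decomposition, else the one of minimal exponent
def Ans (n : Int) (r : Option Int × Option Int) : Prop :=
  (r = (none, none) ∧ ∀ x k, ¬ Sol n x k) ∨
  (∃ bx bk, r = (some bx, some bk) ∧ Sol n bx bk ∧ ∀ x k, Sol n x k → bk ≤ k)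

lemma sol_exp_unique {n x k k' : Int} (h : Sol n x k) (h' : Sol n x k') : k = k' := by
  obtain ⟨hx, hk, he⟩ := h
  obtain ⟨_, hk', he'⟩ := h'
  have : x ^ k.toNat = x ^ k'.toNat := he.trans he'.symm
  have hinj := Int.pow_right_injective (a := x) (by omega) this
  omega

lemma sol_base_unique {n x x' k : Int} (h : Sol n x k) (h' : Sol n x' k) : x = x' := by
  obtain ⟨hx, hk, he⟩ := h
  obtain ⟨hx', _, he'⟩ := h'
  by_contra hne
  rcases lt_or_gt_of_ne hne with hlt | hlt
  · have := pow_lt_pow_left₀ hlt (by omega : (0:Int) ≤ x) (by omega : k.toNat ≠ 0)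
    omega
  · have := pow_lt_pow_left₀ hlt (by omega : (0:Int) ≤ x') (by omega : k.toNat ≠ 0)
    omega

lemma ans_unique {n : Int} {r1 r2 : Option Int × Option Int} (h1 : Ans n r1) (h2 : Ans n r2) :
    r1 = r2 := by
  rcases h1 with ⟨e1, no1⟩ | ⟨x1, k1, e1, s1, m1⟩
  · rcases h2 with ⟨e2, _⟩ | ⟨x2, k2, e2, s2, _⟩
    · rw [e1, e2]
    · exact absurd s2 (no1 x2 k2)
  · rcases h2 with ⟨e2, no2⟩ | ⟨x2, k2, e2, s2, m2⟩
    · exact absurd s1 (no2 x1 k1)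
    · have hk : k1 = k2 := le_antisymm (m1 x2 k2 s2) (m2 x1 k1 s1)
      subst hk
      have hx : x1 = x2 := sol_base_unique s1 s2
      rw [e1, e2, hx]

-- ---------- A side ----------

lemma power_eq (m : Int) (a : Int) (hm : 0 ≤ m) (ha : a ≠ 0) : power a m = a ^ m.toNat := by
  fun_induction power a m with
  | case1 m h => omega
  | case2 h h0 => exact absurd h ha
  | case3 h h0 => norm_num
  | case4 h h0 => norm_num
  | case5 m hneg hzero hone half ih1 ih2 =>
    have hfd : PySem.Int.floordiv m 2 = m / 2 := PySem.Int.floordiv_eq_ediv_of_pos (by omega)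
    have hm0 := PySem.Int.mod_nonneg m (b := 2) (by omega)
    have hm2 := PySem.Int.mod_lt m (b := 2) (by omega)
    have hmd : PySem.Int.mod m 2 = m % 2 := PySem.Int.mod_eq_emod_of_pos (by omega)
    show half * half * power a (PySem.Int.mod m 2) = a ^ m.toNat
    rw [show half = power a (PySem.Int.floordiv m 2) from rfl,
        ih1 (by rw [hfd]; omega), ih2 hm0, ← pow_add, ← pow_add]
    congr 1
    rw [hfd, hmd]
    omega

lemma fd_ne_zero (n : Int) (hn : 0 < n) (t : Nat) :
    PySem.Int.floordiv n (2 ^ t) ≠ 0 ↔ 2 ^ t ≤ n := by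
  have hpow : (0:Int) < 2 ^ t := by positivity
  rw [PySem.Int.floordiv_eq_ediv_of_pos hpow]
  constructor
  · intro hd
    by_contra hlt
    exact hd (Int.ediv_eq_zero_of_lt (by omega) (by omega))
  · intro hle h0
    have h1 : 1 ≤ n / 2 ^ t := Int.le_ediv_iff_mul_le hpow |>.mpr (by omega)
    omega

lemma bitLoop_spec (n : Int) (hn : 0 < n) :
    ∀ b : Int, 0 ≤ b → (b = 0 ∨ 2 ^ (b - 1).toNat ≤ n) →
      1 ≤ bitLoop n b ∧ 2 ^ (bitLoop n b - 1).toNat ≤ n ∧ n < 2 ^ (bitLoop n b).toNat := by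
  intro b hb hinv
  fun_induction bitLoop n b with
  | case1 b h => omega
  | case2 b h hd ih =>
    rw [fd_ne_zero n hn] at hd
    exact ih (by omega) (Or.inr (by simpa using hd))
  | case3 b h hd =>
    rw [fd_ne_zero n hn, not_le] at hd
    refine ⟨?_, ?_, hd⟩
    · by_contra hb1
      have : b = 0 := by omega
      subst this
      simp at hd
      omega
    · rcases hinv with h0 | h2
      · subst h0; simp at hd; omega
      · exact h2

lemma bs_found (n k : Int) (hk : 2 ≤ k) :
    ∀ N : Nat, ∀ lo hi x : Int, (hi + 1 - lo).toNat ≤ N → 1 ≤ lo → lo ≤ x → x ≤ hi →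
      x ^ k.toNat = n → binsearch n k lo hi = some x := by
  intro N
  induction N with
  | zero => intro lo hi x hm _ h1 h2 _; omega
  | succ N ih =>
    intro lo hi x hm hlo hx1 hx2 he
    rw [binsearch]
    dsimp only
    have hle : lo ≤ hi := le_trans hx1 hx2
    rw [if_pos hle]
    have hfd : PySem.Int.floordiv (hi - lo) 2 = (hi - lo) / 2 :=
      PySem.Int.floordiv_eq_ediv_of_pos (by omega)
    set mid := lo + PySem.Int.floordiv (hi - lo) 2 with hmid
    have hmb : lo ≤ mid ∧ mid ≤ hi := by rw [hmid, hfd]; omega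
    have hnum : power mid k = mid ^ k.toNat := power_eq k mid (by omega) (by omega)
    rw [hnum]
    have hkz : k.toNat ≠ 0 := by omega
    by_cases h1 : mid ^ k.toNat = n
    · rw [if_pos h1]
      congr 1
      by_contra hne
      rcases lt_or_gt_of_ne hne with hlt | hlt
      · have := pow_lt_pow_left₀ hlt (by omega : (0:Int) ≤ mid) hkz
        omega
      · have := pow_lt_pow_left₀ hlt (by omega : (0:Int) ≤ x) hkz
        omega
    · rw [if_neg h1]
      by_cases h2 : mid ^ k.toNat > n
      · rw [if_pos h2]
        have hxmid : x < mid := by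
          by_contra hge
          have : mid ^ k.toNat ≤ x ^ k.toNat :=
            pow_le_pow_left₀ (by omega) (by omega) k.toNat
          omega
        exact ih lo (mid - 1) x (by omega) hlo hx1 (by omega) he
      · rw [if_neg h2]
        have hxmid : mid < x := by
          by_contra hge
          have : x ^ k.toNat ≤ mid ^ k.toNat :=
            pow_le_pow_left₀ (by omega) (by omega) k.toNat
          omega
        exact ih (mid + 1) hi x (by omega) (by omega) (by omega) hx2 he

lemma bs_none (n k : Int) (hk : 2 ≤ k) :
    ∀ N : Nat, ∀ lo hi : Int, (hi + 1 - lo).toNat ≤ N → 1 ≤ lo →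
      (∀ x, lo ≤ x → x ≤ hi → x ^ k.toNat ≠ n) → binsearch n k lo hi = none := by
  intro N
  induction N with
  | zero =>
    intro lo hi hm hlo _
    rw [binsearch, if_neg (by omega)]
  | succ N ih =>
    intro lo hi hm hlo hno
    rw [binsearch]
    dsimp only
    by_cases hle : lo ≤ hi
    swap
    · rw [if_neg hle]
    rw [if_pos hle]
    have hfd : PySem.Int.floordiv (hi - lo) 2 = (hi - lo) / 2 :=
      PySem.Int.floordiv_eq_ediv_of_pos (by omega)
    set mid := lo + PySem.Int.floordiv (hi - lo) 2 with hmid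
    have hmb : lo ≤ mid ∧ mid ≤ hi := by rw [hmid, hfd]; omega
    have hnum : power mid k = mid ^ k.toNat := power_eq k mid (by omega) (by omega)
    rw [hnum]
    rw [if_neg (hno mid hmb.1 hmb.2)]
    by_cases h2 : mid ^ k.toNat > n
    · rw [if_pos h2]
      exact ih lo (mid - 1) (by omega) hlo (fun x ha hb => hno x ha (by omega))
    · rw [if_neg h2]
      exact ih (mid + 1) hi (by omega) (by omega) (fun x ha hb => hno x (by omega) hb)

-- any solution (x, k) with k < b lies inside the interval searchK hands to binsearch
lemma range_contain (n b x k : Int) (hb1 : 1 ≤ b)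
    (hlo : 2 ^ (b - 1).toNat ≤ n) (hhi : n < 2 ^ b.toNat)
    (hkb : k < b) (hs : Sol n x k) :
    2 ^ (PySem.Int.floordiv (b - 1) k).toNat ≤ x ∧
      x ≤ 2 ^ (if PySem.Int.mod b k > 0 then PySem.Int.floordiv b k + 1
               else PySem.Int.floordiv b k).toNat - 1 := by
  obtain ⟨hx2, hk2, he⟩ := hs
  have hkz : k.toNat ≠ 0 := by omega
  have hkpos : (0:Int) < k := by omega
  have hfd : PySem.Int.floordiv (b - 1) k = (b - 1) / k :=
    PySem.Int.floordiv_eq_ediv_of_pos hkpos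
  have hfdb : PySem.Int.floordiv b k = b / k := PySem.Int.floordiv_eq_ediv_of_pos hkpos
  have hmd : PySem.Int.mod b k = b % k := PySem.Int.mod_eq_emod_of_pos hkpos
  constructor
  · rw [hfd]
    set e := (b - 1) / k with hedef
    have he0 : 0 ≤ e := Int.ediv_nonneg (by omega) (by omega)
    have hek : e * k ≤ b - 1 := Int.ediv_mul_le (b - 1) (by omega)
    have hcast : ((e.toNat * k.toNat : Nat) : Int) = e * k := by
      push_cast [Int.toNat_of_nonneg he0, Int.toNat_of_nonneg hkpos.le]; ring
    have hexp : e.toNat * k.toNat ≤ (b - 1).toNat := by omega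
    have h1 : (2:Int) ^ (e.toNat * k.toNat) ≤ 2 ^ (b - 1).toNat :=
      pow_le_pow_right₀ (by norm_num) hexp
    by_contra hxe
    push Not at hxe
    have h2 : x ^ k.toNat < (2 ^ e.toNat) ^ k.toNat :=
      pow_lt_pow_left₀ hxe (by omega) hkz
    rw [← pow_mul] at h2
    omega
  · rw [hmd, hfdb]
    set q2 := (if b % k > 0 then b / k + 1 else b / k) with hq2
    have hq0 : 0 ≤ b / k := Int.ediv_nonneg (by omega) (by omega)
    have hq20 : 0 ≤ q2 := by rw [hq2]; split <;> omega
    have hbq : b ≤ q2 * k := by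
      have hdm := Int.emod_add_mul_ediv b k
      have hm0 : 0 ≤ b % k := Int.emod_nonneg b (by omega)
      have hmk : b % k < k := Int.emod_lt_of_pos b hkpos
      rw [hq2]
      split
      · have hmul : (b / k + 1) * k = k * (b / k) + k := by ring
        omega
      · have hmul : (b / k) * k = k * (b / k) := by ring
        omega
    have hcast : ((q2.toNat * k.toNat : Nat) : Int) = q2 * k := by
      push_cast [Int.toNat_of_nonneg hq20, Int.toNat_of_nonneg hkpos.le]; ring
    have hexp : b.toNat ≤ q2.toNat * k.toNat := by omega
    have h1 : (2:Int) ^ b.toNat ≤ 2 ^ (q2.toNat * k.toNat) :=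
      pow_le_pow_right₀ (by norm_num) hexp
    by_contra hxe
    push Not at hxe
    have h2 : (2 ^ q2.toNat) ^ k.toNat ≤ x ^ k.toNat :=
      pow_le_pow_left₀ (by positivity) (by omega) k.toNat
    rw [← pow_mul] at h2
    omega

lemma bs_found' (n k : Int) (hk : 2 ≤ k) (lo hi x : Int) (hlo : 1 ≤ lo) (hx1 : lo ≤ x)
    (hx2 : x ≤ hi) (he : x ^ k.toNat = n) : binsearch n k lo hi = some x :=
  bs_found n k hk (hi + 1 - lo).toNat lo hi x (le_refl _) hlo hx1 hx2 he

lemma sol_k_lt_b (n b K x : Int) (hhi : n < 2 ^ b.toNat) (hs : Sol n x K) : K < b := by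
  obtain ⟨hx2, hk2, he⟩ := hs
  have h2 : (2:Int) ^ K.toNat ≤ x ^ K.toNat := pow_le_pow_left₀ (by omega) hx2 K.toNat
  have h3 : n < 2 ^ b.toNat := hhi
  by_contra hge
  have hbK : b.toNat ≤ K.toNat := by omega
  have h4 : (2:Int) ^ b.toNat ≤ 2 ^ K.toNat := pow_le_pow_right₀ (by norm_num) hbK
  omega

lemma sk_none (n b : Int) (hn : 2 ≤ n ∨ b ≤ 2) :
    ∀ N : Nat, ∀ k : Int, (b - k).toNat ≤ N → 2 ≤ k →
      (∀ x k', k ≤ k' → ¬ Sol n x k') → searchK n b k = (none, none) := by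
  intro N
  induction N with
  | zero =>
    intro k hm hk hno
    rw [searchK, if_neg (by omega)]
  | succ N ih =>
    intro k hm hk hno
    rw [searchK]
    by_cases hkb : k < b
    swap
    · rw [if_neg hkb]
    rw [if_pos hkb]
    dsimp only
    have hn2 : 2 ≤ n := by
      rcases hn with h | h
      · exact h
      · omega
    have hlo1 : (1:Int) ≤ 2 ^ (PySem.Int.floordiv (b - 1) k).toNat := by
      have : (0:Int) < 2 ^ (PySem.Int.floordiv (b - 1) k).toNat := by positivity
      omega
    have hbs : binsearch n k (2 ^ (PySem.Int.floordiv (b - 1) k).toNat)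
        (2 ^ (if PySem.Int.mod b k > 0 then PySem.Int.floordiv b k + 1
              else PySem.Int.floordiv b k).toNat - 1) = none := by
      apply bs_none n k (by omega) _ _ _ (le_refl _) hlo1
      intro y hy1 hy2 hyk
      have hy1' : (1:Int) ≤ y := le_trans hlo1 hy1
      have hy2' : 2 ≤ y := by
        rcases eq_or_lt_of_le hy1' with h | h
        · exfalso; rw [← h, one_pow] at hyk; omega
        · omega
      exact hno y k (le_refl k) ⟨hy2', hk, hyk⟩
    rw [hbs]
    exact ih (k + 1) (by omega) (by omega) (fun x k' hk' => hno x k' (by omega))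

lemma sk_some (n b : Int) (hn : 2 ≤ n) (hb1 : 1 ≤ b)
    (hlo : 2 ^ (b - 1).toNat ≤ n) (hhi : n < 2 ^ b.toNat) :
    ∀ N : Nat, ∀ k x K : Int, (b - k).toNat ≤ N → 2 ≤ k → k ≤ K → Sol n x K →
      (∀ x' k', k ≤ k' → k' < K → ¬ Sol n x' k') → searchK n b k = (some x, some K) := by
  intro N
  induction N with
  | zero =>
    intro k x K hm hk hkK hs hno
    exfalso
    have := sol_k_lt_b n b K x hhi hs
    omega
  | succ N ih =>
    intro k x K hm hk hkK hs hno
    have hKb : K < b := sol_k_lt_b n b K x hhi hs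
    rw [searchK, if_pos (by omega)]
    dsimp only
    have hlo1 : (1:Int) ≤ 2 ^ (PySem.Int.floordiv (b - 1) k).toNat := by
      have : (0:Int) < 2 ^ (PySem.Int.floordiv (b - 1) k).toNat := by positivity
      omega
    rcases eq_or_lt_of_le hkK with hEq | hlt
    · subst hEq
      obtain ⟨hcl, hcu⟩ := range_contain n b x k hb1 hlo hhi hKb hs
      rw [bs_found' n k (by omega) _ _ x hlo1 hcl hcu hs.2.2]
    · have hbs : binsearch n k (2 ^ (PySem.Int.floordiv (b - 1) k).toNat)
          (2 ^ (if PySem.Int.mod b k > 0 then PySem.Int.floordiv b k + 1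
                else PySem.Int.floordiv b k).toNat - 1) = none := by
        apply bs_none n k (by omega) _ _ _ (le_refl _) hlo1
        intro y hy1 hy2 hyk
        have hy1' : (1:Int) ≤ y := le_trans hlo1 hy1
        have hy2' : 2 ≤ y := by
          rcases eq_or_lt_of_le hy1' with h | h
          · exfalso; rw [← h, one_pow] at hyk; omega
          · omega
        exact hno y k (le_refl k) hlt ⟨hy2', hk, hyk⟩
      rw [hbs]
      exact ih (k + 1) x K (by omega) (by omega) (by omega) hs
        (fun x' k' hk' hk'' => hno x' k' (by omega) hk'')

-- ---------- B side ----------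

def upd (best : Option Int × Option Int) (x k : Int) : Option Int × Option Int :=
  match best.2 with
  | none => (some x, some k)
  | some bk => if k < bk then (some x, some k) else best

lemma in_none (n x : Int) (hx : 2 ≤ x) :
    ∀ N : Nat, ∀ p j : Int, ∀ best, (n + 1 - p).toNat ≤ N → 1 ≤ p →
      (∀ m : Nat, p * x ^ m ≠ n) → altInner n x p j best = best := by
  intro N
  induction N with
  | zero =>
    intro p j best hm hp hno
    have hpn : ¬ p ≤ n := by
      intro hle
      have h0 := hno 0
      rw [pow_zero, mul_one] at h0
      omega
    rw [altInner, if_neg hpn]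
  | succ N ih =>
    intro p j best hm hp hno
    rw [altInner]
    by_cases hpn : p ≤ n
    swap
    · rw [if_neg hpn]
    rw [if_pos hpn]
    dsimp only
    have hpne : p ≠ n := by
      have h0 := hno 0
      rw [pow_zero, mul_one] at h0
      exact h0
    rw [if_neg (by intro hc; exact hpne hc.1)]
    have hpx : p < p * x := by
      have h2 : p * 2 ≤ p * x := mul_le_mul_of_nonneg_left hx (by omega)
      omega
    rw [dif_pos hpx]
    apply ih (p * x) (j + 1) best (by omega) (by omega)
    intro m hc
    apply hno (m + 1)
    rw [pow_succ]
    calc p * (x ^ m * x) = p * x * x ^ m := by ring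
    _ = n := hc

lemma in_some (n x : Int) (hx : 2 ≤ x) :
    ∀ m : Nat, ∀ p j : Int, ∀ best, 1 ≤ p → p * x ^ m = n →
      altInner n x p j best = upd best x (j + m) := by
  intro m
  induction m with
  | zero =>
    intro p j best hp hpn
    rw [pow_zero, mul_one] at hpn
    subst hpn
    rw [altInner, if_pos (le_refl _)]
    dsimp only
    have hpx : p < p * x := by
      have h2 : p * 2 ≤ p * x := mul_le_mul_of_nonneg_left hx (by omega)
      omega
    rw [dif_pos hpx]
    rw [altInner, if_neg (by omega : ¬ p * x ≤ p)]
    rcases hb2 : best.2 with _ | bk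
    · simp [upd, hb2]
    · simp only [upd, hb2]
      by_cases hjb : j < bk
      · simp [hjb]
      · simp [hjb]
  | succ m ih =>
    intro p j best hp hpn
    have hx2 : (2:Int) ≤ x ^ (m + 1) := by
      calc (2:Int) = 2 ^ 1 := by norm_num
      _ ≤ 2 ^ (m + 1) := pow_le_pow_right₀ (by norm_num) (by omega)
      _ ≤ x ^ (m + 1) := pow_le_pow_left₀ (by norm_num) hx (m + 1)
    have hplt : p < n := by nlinarith
    rw [altInner, if_pos (by omega)]
    dsimp only
    rw [if_neg (by intro hc; omega)]
    have hpx : p < p * x := by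
      have h2 : p * 2 ≤ p * x := mul_le_mul_of_nonneg_left hx (by omega)
      omega
    rw [dif_pos hpx]
    have hrec := ih (p * x) (j + 1) best (by omega)
      (by rw [← hpn, pow_succ]; ring)
    rw [hrec]
    congr 1
    push_cast
    ring

def InvB (n : Int) (best : Option Int × Option Int) (x : Int) : Prop :=
  (best = (none, none) ∧ ∀ x' k', x' < x → ¬ Sol n x' k') ∨
  (∃ bx bk, best = (some bx, some bk) ∧ bx < x ∧ Sol n bx bk ∧
    ∀ x' k', x' < x → Sol n x' k' → bk ≤ k')

lemma inv_exit (n x : Int) (best : Option Int × Option Int) (hx : 2 ≤ x) (hxx : ¬ x * x ≤ n)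
    (hinv : InvB n best x) : Ans n best := by
  have hall : ∀ x' k', Sol n x' k' → x' < x := by
    rintro x' k' ⟨h2, hk2, he⟩
    by_contra hge
    have h1 : x' * x' ≤ x' ^ k'.toNat := by
      calc x' * x' = x' ^ 2 := by ring
      _ ≤ x' ^ k'.toNat := pow_le_pow_right₀ (by omega) (by omega)
    have h2' : x * x ≤ x' * x' := by
      have a1 : x * x ≤ x' * x := mul_le_mul_of_nonneg_right (by omega) (by omega)
      have a2 : x' * x ≤ x' * x' := mul_le_mul_of_nonneg_left (by omega) (by omega)
      omega
    omega
  rcases hinv with ⟨hbe, hnone⟩ | ⟨bx, bk, hbe, _, hbs, hmin⟩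
  · exact Or.inl ⟨hbe, fun x' k' hs => hnone x' k' (hall x' k' hs) hs⟩
  · exact Or.inr ⟨bx, bk, hbe, hbs, fun x' k' hs => hmin x' k' (hall x' k' hs) hs⟩

lemma pow_two_add (x : Int) (m : Nat) : x * x * x ^ m = x ^ (2 + m) := by
  rw [pow_add]; ring

lemma out_spec (n : Int) (hn : 1 ≤ n) :
    ∀ N : Nat, ∀ x : Int, ∀ best, (n + 1 - x).toNat ≤ N → 2 ≤ x → InvB n best x →
      Ans n (altOuter n x best) := by
  intro N
  induction N with
  | zero =>
    intro x best hm hx hinv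
    have hxx : ¬ x * x ≤ n := by
      have a1 : x * 2 ≤ x * x := mul_le_mul_of_nonneg_left (by omega) (by omega)
      omega
    rw [altOuter, if_neg hxx]
    exact inv_exit n x best hx hxx hinv
  | succ N ih =>
    intro x best hm hx hinv
    rw [altOuter]
    by_cases hxx : x * x ≤ n
    swap
    · rw [if_neg hxx]
      exact inv_exit n x best hx hxx hinv
    rw [if_pos hxx]
    have hxn : x ≤ n := by nlinarith
    by_cases hex : ∃ K : Int, 2 ≤ K ∧ x ^ K.toNat = n
    · obtain ⟨K, hK2, hKe⟩ := hex
      have hsolx : Sol n x K := ⟨hx, hK2, hKe⟩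
      have hm' : x * x * x ^ (K.toNat - 2) = n := by
        rw [pow_two_add, show 2 + (K.toNat - 2) = K.toNat by omega, hKe]
      have hin := in_some n x hx (K.toNat - 2) (x * x) 2 best (by nlinarith) hm'
      rw [show (2:Int) + ((K.toNat - 2 : Nat) : Int) = K by omega] at hin
      rw [hin]
      apply ih (x + 1) (upd best x K) (by omega) (by omega)
      rcases hinv with ⟨hbe, hnone⟩ | ⟨bx, bk, hbe, hbxlt, hbs, hmin⟩
      · refine Or.inr ⟨x, K, ?_, by omega, hsolx, ?_⟩
        · rw [hbe]; simp [upd]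
        · intro x' k' hlt hs'
          by_cases hx'x : x' = x
          · subst hx'x
            rw [sol_exp_unique hsolx hs']
          · exact absurd hs' (hnone x' k' (by omega))
      · by_cases hKbk : K < bk
        · refine Or.inr ⟨x, K, ?_, by omega, hsolx, ?_⟩
          · rw [hbe]; simp [upd, hKbk]
          · intro x' k' hlt hs'
            by_cases hx'x : x' = x
            · subst hx'x
              rw [sol_exp_unique hsolx hs']
            · have := hmin x' k' (by omega) hs'
              omega
        · refine Or.inr ⟨bx, bk, ?_, by omega, hbs, ?_⟩
          · rw [hbe]; simp [upd, hKbk]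
          · intro x' k' hlt hs'
            by_cases hx'x : x' = x
            · subst hx'x
              have := sol_exp_unique hsolx hs'
              omega
            · exact hmin x' k' (by omega) hs'
    · have hin := in_none n x hx (n + 1 - x * x).toNat (x * x) 2 best (le_refl _)
        (by nlinarith) (by
          intro m hc
          rw [pow_two_add] at hc
          exact hex ⟨2 + (m : Int), by omega, by
            rw [show ((2 + (m : Int)).toNat) = 2 + m by omega, hc]⟩)
      rw [hin]
      apply ih (x + 1) best (by omega) (by omega)
      rcases hinv with ⟨hbe, hnone⟩ | ⟨bx, bk, hbe, hbxlt, hbs, hmin⟩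
      · refine Or.inl ⟨hbe, ?_⟩
        intro x' k' hlt hs'
        by_cases hx'x : x' = x
        · subst hx'x
          exact hex ⟨k', hs'.2.1, hs'.2.2⟩
        · exact hnone x' k' (by omega) hs'
      · refine Or.inr ⟨bx, bk, hbe, by omega, hbs, ?_⟩
        intro x' k' hlt hs'
        by_cases hx'x : x' = x
        · subst hx'x
          exact absurd ⟨k', hs'.2.1, hs'.2.2⟩ hex
        · exact hmin x' k' (by omega) hs'

-- ---------- results ----------

lemma a_ans (n : Int) (hn : 1 ≤ n) : Ans n (check_power n) := by
  rw [check_power, if_neg (by omega)]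
  obtain ⟨hb1, hblo, hbhi⟩ := bitLoop_spec n (by omega) 0 (le_refl 0) (Or.inl rfl)
  set b := bitLoop n 0 with hbdef
  by_cases hex : ∃ x k, Sol n x k
  · obtain ⟨x0, k0, hs0⟩ := hex
    have hn2 : 2 ≤ n := by
      obtain ⟨h2, hk2, he⟩ := hs0
      have ha : (2:Int) ^ k0.toNat ≤ x0 ^ k0.toNat := pow_le_pow_left₀ (by omega) h2 k0.toNat
      have hb : (2:Int) ^ 1 ≤ 2 ^ k0.toNat := pow_le_pow_right₀ (by norm_num) (by omega)
      omega
    haveI : DecidablePred (fun m : Nat => ∃ x, Sol n x (m : Int)) :=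
      fun _ => Classical.propDecidable _
    have hP : ∃ m : Nat, ∃ x, Sol n x (m : Int) :=
      ⟨k0.toNat, x0, by rwa [show ((k0.toNat : Nat) : Int) = k0 from by have := hs0.2.1; omega]⟩
    obtain ⟨xK, hsK⟩ := Nat.find_spec hP
    have hKmin := fun m => Nat.find_min hP (m := m)
    have hK2 : (2:Int) ≤ (Nat.find hP : Int) := hsK.2.1
    have hres := sk_some n b hn2 hb1 hblo hbhi (b - 2).toNat 2 xK (Nat.find hP)
      (le_refl _) (le_refl _) hK2 hsK (by
        intro x' k' hk2' hk'K hs'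
        refine hKmin (m := k'.toNat) (by omega) ⟨x', ?_⟩
        rwa [show ((k'.toNat : Nat) : Int) = k' from by have := hs'.2.1; omega])
    rw [hres]
    refine Or.inr ⟨xK, (Nat.find hP : Int), rfl, hsK, ?_⟩
    intro x k hs
    by_contra hlt
    exact hKmin (m := k.toNat) (by have := hs.2.1; omega)
      ⟨x, by rwa [show ((k.toNat : Nat) : Int) = k from by have := hs.2.1; omega]⟩
  · have hnb : 2 ≤ n ∨ b ≤ 2 := by
      rcases (by omega : n = 1 ∨ 2 ≤ n) with h1 | h2
      · right
        by_contra hb3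
        have : (2:Int) ^ 1 ≤ 2 ^ (b - 1).toNat := pow_le_pow_right₀ (by norm_num) (by omega)
        omega
      · exact Or.inl h2
    rw [sk_none n b hnb (b - 2).toNat 2 (le_refl _) (le_refl _)
      (fun x k' _ hs => hex ⟨x, k', hs⟩)]
    exact Or.inl ⟨rfl, fun x k hs => hex ⟨x, k, hs⟩⟩

lemma b_ans (n : Int) (hn : 1 ≤ n) : Ans n (check_power_alt n) := by
  rw [check_power_alt, if_neg (by omega)]
  exact out_spec n hn (n + 1 - 2).toNat 2 (none, none) (le_refl _) (le_refl _)
    (Or.inl ⟨rfl, fun x' k' hlt hs => by obtain ⟨h2, _, _⟩ := hs; omega⟩)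

-- ===== VERDICT (by name: the statement is the Claim_ definition above) =====
theorem check_power_spec : Claim_equal_check_power := by
  intro n _ hpre
  unfold Spec_check_power
  exact ans_unique (a_ans n hpre) (b_ans n hpre)
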